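-- pv_equiv track=rewrite | github.com/fkutzner/PyCSCL | tests/cscl/test_cardinality_constraints_encoders.py | select_items_by_bits
-- ===== SOURCE A (Python) =====
-- def select_items_by_bits(lst, i):
--     """
--     Selects items from lst indexed by the bits in i.
--
--     :param lst: A list.
--     :param i: A non-negative integer whose most significant bit is at a position lesser than len(lst).
--     :return: A list containing all lst[k] where (i & (1 << k)) == 1.
--     """
--     assert (i >= 0)
--
--     result = []
--     counter = 0
--     while i > 0:
--         if i & 1 != 0:
--             result.append(lst[counter])
--         i = i >> 1
--         counter += 1
--
--     return result
-- ===== SOURCE B (Python) =====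
-- def select_items_by_bits(lst, i):
--     if not lst or i == 0:
--         return []
--     rest = select_items_by_bits(lst[1:], i >> 1)
--     return [lst[0]] + rest if i & 1 else rest
-- ===== Notes on version B (the rewrite author's own statement) =====
-- stated objective: alternative
-- what changed: Replaces the imperative while-loop that mutates a shifted copy of i, a position counter and an accumulator with a structural recursion on the list: each step keeps or drops the head according to the low bit and recurses on the tail with the halved integer.
import Mathlib
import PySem

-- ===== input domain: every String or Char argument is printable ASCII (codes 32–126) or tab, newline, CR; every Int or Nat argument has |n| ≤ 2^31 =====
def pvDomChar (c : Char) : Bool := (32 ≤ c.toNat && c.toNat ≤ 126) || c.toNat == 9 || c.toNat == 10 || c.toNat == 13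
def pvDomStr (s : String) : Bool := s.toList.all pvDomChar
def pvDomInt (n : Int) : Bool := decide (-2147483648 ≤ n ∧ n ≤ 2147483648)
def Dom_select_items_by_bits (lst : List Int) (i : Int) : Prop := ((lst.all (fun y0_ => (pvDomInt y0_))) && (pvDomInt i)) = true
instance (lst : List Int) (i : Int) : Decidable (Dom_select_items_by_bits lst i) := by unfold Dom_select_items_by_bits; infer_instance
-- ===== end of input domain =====

-- B replaces A's while-loop over the shifted integer (mutating i, a counter and an
-- accumulator) with a structural recursion on the list; equal to A wherever A returns.

-- ===== PORT A =====
-- the while-loop: state (i, counter, result); `lst[counter]` is pyGet? (IndexError = none,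
-- excluded by Pre_, the port takes .getD 0 there); `i >> 1` for i > 0 is floor division by 2.
def selLoopA (lst : List Int) (i : Int) (counter : Int) (result : List Int) : List Int :=
  if h : i > 0 then
    selLoopA lst (PySem.Int.floordiv i 2) (counter + 1)
      (if PySem.Int.band i 1 ≠ 0 then result ++ [(PySem.List.pyGet? lst counter).getD 0]
       else result)
  else result
termination_by i.toNat
decreasing_by
  have := PySem.Int.floordiv_eq_ediv_of_pos (a := i) (b := 2) (by omega)
  omega

def select_items_by_bits (lst : List Int) (i : Int) : List Int :=
  -- assert i >= 0: Python raises AssertionError for i < 0; excluded by Pre_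
  selLoopA lst i 0 []

-- ===== PORT B =====
def select_items_by_bits_alt (lst : List Int) (i : Int) : List Int :=
  match lst with
  | [] => []
  | x :: xs =>
    if i = 0 then []
    else
      let rest := select_items_by_bits_alt xs (PySem.Int.floordiv i 2)
      if PySem.Int.band i 1 ≠ 0 then x :: rest else rest

-- ===== PRECONDITION & SPEC =====
-- Pre_ excludes exactly the inputs where Python A raises: i < 0 (AssertionError) and
-- i ≥ 2^len(lst) (some set bit indexes past the list: IndexError).
def Pre_select_items_by_bits (lst : List Int) (i : Int) : Prop :=
  0 ≤ i ∧ i < 2 ^ lst.length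
instance (lst : List Int) (i : Int) : Decidable (Pre_select_items_by_bits lst i) := by
  unfold Pre_select_items_by_bits; infer_instance

def pvWitness_select_items_by_bits : List Int × Int := ([3, -1, 7], 5)

def Spec_select_items_by_bits (lst : List Int) (i : Int) (out : List Int) : Prop := out = select_items_by_bits_alt lst i
instance (lst : List Int) (i : Int) (out : List Int) : Decidable (Spec_select_items_by_bits lst i out) := by unfold Spec_select_items_by_bits; infer_instance

-- ===== CLAIM (what is proved, stated in full; the proofs are below) =====
def Claim_equal_select_items_by_bits : Prop := ∀ (lst : List Int) (i : Int), Dom_select_items_by_bits lst i → Pre_select_items_by_bits lst i → Spec_select_items_by_bits lst i (select_items_by_bits lst i)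

-- ===== LEMMAS AND PROOFS =====

-- loop invariant: with `counter = pre.length` positions already consumed, A's loop appends
-- exactly B's selection from the remaining tail.
theorem selLoopA_eq_alt (tail : List Int) : ∀ (pre : List Int) (i : Int) (res : List Int),
    0 ≤ i → i < 2 ^ tail.length →
    selLoopA (pre ++ tail) i (pre.length : Int) res
      = res ++ select_items_by_bits_alt tail i := by
  induction tail with
  | nil =>
    intro pre i res h0 hlt
    have hz : i = 0 := by simp at hlt; omega
    subst hz
    rw [selLoopA]
    simp [select_items_by_bits_alt]
  | cons x xs ih =>
    intro pre i res h0 hlt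
    rcases eq_or_lt_of_le h0 with h | hpos
    · rw [selLoopA]
      simp [select_items_by_bits_alt, ← h]
    · have hfd : PySem.Int.floordiv i 2 = i / 2 :=
        PySem.Int.floordiv_eq_ediv_of_pos (by omega)
      have hmod : PySem.Int.band i 1 = i % 2 := by
        rw [PySem.Int.band_one, PySem.Int.mod_eq_emod_of_pos (by omega)]
      rw [selLoopA]
      simp only [hpos, dif_pos, hfd, hmod]
      have hget : PySem.List.pyGet? (pre ++ x :: xs) (pre.length : Int) = some x :=
        PySem.List.pyGet?_append_length pre xs x
      rw [hget]
      have hlen : ((pre.length : Int) + 1) = ((pre ++ [x]).length : Int) := by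
        simp
      have happ : pre ++ x :: xs = (pre ++ [x]) ++ xs := by simp
      have hb0 : 0 ≤ i / 2 := by omega
      have hb1 : i / 2 < 2 ^ xs.length := by
        have : (2 : Int) ^ (x :: xs).length = 2 * 2 ^ xs.length := by
          simp [pow_succ]; ring
        rw [this] at hlt
        omega
      rw [hlen, happ, ih ((pre ++ [x])) (i / 2) _ hb0 hb1]
      have hne : i ≠ 0 := by omega
      by_cases hodd : i % 2 ≠ 0
      · simp [select_items_by_bits_alt, hne, hodd, hmod, Option.getD]
      · simp [select_items_by_bits_alt, hne, hodd, hmod]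

-- ===== VERDICT (by name: the statement is the Claim_ definition above) =====
theorem select_items_by_bits_spec : Claim_equal_select_items_by_bits := by
  intro lst i _ hpre
  unfold Spec_select_items_by_bits select_items_by_bits
  have h := selLoopA_eq_alt lst [] i [] hpre.1 hpre.2
  simpa using h
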